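-- pv_equiv track=rewrite | github.com/MathisHeriveau/Advent-of-code-25 | src/day09.py | largest_rectangle_red_green
-- ===== SOURCE A (Python) =====
-- def rect_area(p1, p2) -> int:
--     x1, y1 = p1
--     x2, y2 = p2
--     # +1 parce qu’on compte les tuiles, pas juste la distance
--     return (abs(x1 - x2) + 1) * (abs(y1 - y2) + 1)
--
-- def build_edges(points):
--     """Chaque edge = segment entre point i et point i+1 (boucle qui wrap)."""
--     edges = []
--     n = len(points)
--     for i in range(n):
--         edges.append((points[i], points[(i + 1) % n]))
--     return edges
--
-- def edge_crosses_rectangle(edge, rect) -> bool: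
--     """
--     True si l’edge traverse l’INTÉRIEUR du rectangle.
--     Les bords qui sont juste sur le bord du rectangle sont OK (autorisés).
--     """
--     (ex1, ey1), (ex2, ey2) = edge
--     (rx1, ry1), (rx2, ry2) = rect
--
--     rx_min, rx_max = sorted((rx1, rx2))
--     ry_min, ry_max = sorted((ry1, ry2))
--
--     if ex1 == ex2:
--         x = ex1
--         ey_min, ey_max = sorted((ey1, ey2))
--
--         if not (rx_min < x < rx_max):
--             return False
--
--         if ey_min <= ry_min:
--             overlap = ey_max > ry_min
--         else:
--             overlap = ry_max > ey_min
--
--         return overlap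
--     else:
--         y = ey1
--         ex_min, ex_max = sorted((ex1, ex2))
--
--         if not (ry_min < y < ry_max):
--             return False
--
--         if ex_min <= rx_min:
--             overlap = ex_max > rx_min
--         else:
--             overlap = rx_max > ex_min
--
--         return overlap
--
-- def largest_rectangle_red_green(points):
--     edges = build_edges(points)
--
--     rects = []
--     n = len(points)
--     for i in range(n):
--         p1 = points[i]
--         for j in range(i + 1, n):
--             p2 = points[j]
--             if p1[0] == p2[0] or p1[1] == p2[1]:
--                 continue
--             a = rect_area(p1, p2)
--             rects.append((a, p1, p2))
--
--     rects.sort(key=lambda t: t[0], reverse=True)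
--
--     for area, p1, p2 in rects:
--         rect = (p1, p2)
--         valid = True
--         for e in edges:
--             if edge_crosses_rectangle(e, rect):
--                 valid = False
--                 break
--         if valid:
--             return area, p1, p2
--
--     return 0, None, None
-- ===== SOURCE B (Python) =====
-- def _blocked(edge, p1, p2):
--     """True if the (axis-parallel) edge passes through the open interior of the
--     rectangle with opposite corners p1, p2."""
--     (ax, ay), (bx, by) = edge
--     xlo, xhi = min(p1[0], p2[0]), max(p1[0], p2[0])
--     ylo, yhi = min(p1[1], p2[1]), max(p1[1], p2[1])
--     if ax == bx:  # vertical edge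
--         return xlo < ax < xhi and min(ay, by) < yhi and ylo < max(ay, by)
--     # horizontal edge
--     return ylo < ay < yhi and min(ax, bx) < xhi and xlo < max(ax, bx)
--
--
-- def largest_rectangle_red_green(points):
--     n = len(points)
--     edges = [(points[i], points[(i + 1) % n]) for i in range(n)]
--     best_area, best_p1, best_p2 = 0, None, None
--     for i in range(n):
--         p1 = points[i]
--         for j in range(i + 1, n):
--             p2 = points[j]
--             if p1[0] == p2[0] or p1[1] == p2[1]:
--                 continue
--             area = (abs(p1[0] - p2[0]) + 1) * (abs(p1[1] - p2[1]) + 1)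
--             if area > best_area and not any(_blocked(e, p1, p2) for e in edges):
--                 best_area, best_p1, best_p2 = area, p1, p2
--     return best_area, best_p1, best_p2
-- ===== Notes on version B (the rewrite author's own statement) =====
-- stated objective: simpler
-- what changed: B drops A's materialised rects list and its descending stable sort entirely: one pass over the i<j pairs keeps a running best with a strict '>' update (checking edge crossings only when the area beats the current best), which reproduces A's stable-sort-then-first-valid tie-break.
import Mathlib
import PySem

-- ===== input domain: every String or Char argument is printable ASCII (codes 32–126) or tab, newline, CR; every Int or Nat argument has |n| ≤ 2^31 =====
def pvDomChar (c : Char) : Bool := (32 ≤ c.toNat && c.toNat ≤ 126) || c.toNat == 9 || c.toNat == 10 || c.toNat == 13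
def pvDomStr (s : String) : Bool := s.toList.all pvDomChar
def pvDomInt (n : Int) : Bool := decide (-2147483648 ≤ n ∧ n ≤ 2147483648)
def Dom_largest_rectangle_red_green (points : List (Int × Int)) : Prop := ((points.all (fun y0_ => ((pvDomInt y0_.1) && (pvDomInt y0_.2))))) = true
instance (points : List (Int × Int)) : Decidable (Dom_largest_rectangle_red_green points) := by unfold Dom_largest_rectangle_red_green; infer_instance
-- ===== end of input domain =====

-- B drops A's materialised rects list and its descending stable sort: a single pass over
-- the i<j pairs keeps a running best (strict '>' reproduces A's stable tie-break); simpler.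

-- ===== PORT A =====
def rect_area (p1 p2 : Int × Int) : Int :=
  (|p1.1 - p2.1| + 1) * (|p1.2 - p2.2| + 1)

def build_edges (points : List (Int × Int)) : List ((Int × Int) × (Int × Int)) :=
  (PySem.List.pyRange 0 points.length).foldl
    (fun acc i =>
      acc ++ [(PySem.List.pyGetD points i (0, 0),
               PySem.List.pyGetD points (PySem.Int.mod (i + 1) points.length) (0, 0))]) []

def edge_crosses_rectangle (edge : (Int × Int) × (Int × Int))
    (rect : (Int × Int) × (Int × Int)) : Bool :=
  let ex1 := edge.1.1; let ey1 := edge.1.2; let ex2 := edge.2.1; let ey2 := edge.2.2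
  let rx_min := min rect.1.1 rect.2.1; let rx_max := max rect.1.1 rect.2.1
  let ry_min := min rect.1.2 rect.2.2; let ry_max := max rect.1.2 rect.2.2
  if ex1 == ex2 then
    let x := ex1
    let ey_min := min ey1 ey2; let ey_max := max ey1 ey2
    if !(decide (rx_min < x) && decide (x < rx_max)) then false
    else if decide (ey_min ≤ ry_min) then decide (ey_max > ry_min)
    else decide (ry_max > ey_min)
  else
    let y := ey1
    let ex_min := min ex1 ex2; let ex_max := max ex1 ex2
    if !(decide (ry_min < y) && decide (y < ry_max)) then false
    else if decide (ex_min ≤ rx_min) then decide (ex_max > rx_min)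
    else decide (rx_max > ex_min)

def largest_rectangle_red_green (points : List (Int × Int)) : Int × (Option (Int × Int)) × (Option (Int × Int)) :=
  let edges := build_edges points
  let n : Int := points.length
  let rects : List (Int × (Int × Int) × (Int × Int)) :=
    (PySem.List.pyRange 0 n).foldl
      (fun acc i =>
        let p1 := PySem.List.pyGetD points i (0, 0)
        (PySem.List.pyRange (i + 1) n).foldl
          (fun acc2 j =>
            let p2 := PySem.List.pyGetD points j (0, 0)
            if p1.1 == p2.1 || p1.2 == p2.2 then acc2
            else acc2 ++ [(rect_area p1 p2, p1, p2)]) acc) []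
  let sortedRects := PySem.List.sorted rects (fun t => t.1) true
  match sortedRects.find? (fun t => !(edges.any (fun e => edge_crosses_rectangle e (t.2.1, t.2.2)))) with
  | some t => (t.1, some t.2.1, some t.2.2)
  | none => (0, none, none)

-- ===== PORT B =====
def pvBlocked (edge : (Int × Int) × (Int × Int)) (p1 p2 : Int × Int) : Bool :=
  let ax := edge.1.1; let ay := edge.1.2; let bx := edge.2.1; let by' := edge.2.2
  let xlo := min p1.1 p2.1; let xhi := max p1.1 p2.1
  let ylo := min p1.2 p2.2; let yhi := max p1.2 p2.2
  if ax == bx then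
    decide (xlo < ax) && decide (ax < xhi) && decide (min ay by' < yhi) && decide (ylo < max ay by')
  else
    decide (ylo < ay) && decide (ay < yhi) && decide (min ax bx < xhi) && decide (xlo < max ax bx)

def largest_rectangle_red_green_alt (points : List (Int × Int)) : Int × (Option (Int × Int)) × (Option (Int × Int)) :=
  let n : Int := points.length
  let edges := (PySem.List.pyRange 0 n).foldl
    (fun acc i =>
      acc ++ [(PySem.List.pyGetD points i (0, 0),
               PySem.List.pyGetD points (PySem.Int.mod (i + 1) n) (0, 0))]) []
  (PySem.List.pyRange 0 n).foldl
    (fun acc i =>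
      let p1 := PySem.List.pyGetD points i (0, 0)
      (PySem.List.pyRange (i + 1) n).foldl
        (fun acc2 j =>
          let p2 := PySem.List.pyGetD points j (0, 0)
          if p1.1 == p2.1 || p1.2 == p2.2 then acc2
          else
            let area := (|p1.1 - p2.1| + 1) * (|p1.2 - p2.2| + 1)
            if decide (area > acc2.1) && !(edges.any (fun e => pvBlocked e p1 p2)) then
              (area, some p1, some p2)
            else acc2) acc)
    ((0 : Int), (none : Option (Int × Int)), (none : Option (Int × Int)))

-- ===== PRECONDITION & SPEC =====
def Spec_largest_rectangle_red_green (points : List (Int × Int)) (out : Int × (Option (Int × Int)) × (Option (Int × Int))) : Prop := out = largest_rectangle_red_green_alt points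
instance (points : List (Int × Int)) (out : Int × (Option (Int × Int)) × (Option (Int × Int))) : Decidable (Spec_largest_rectangle_red_green points out) := by unfold Spec_largest_rectangle_red_green; infer_instance

-- ===== CLAIM (what is proved, stated in full; the proofs are below) =====
def Claim_equal_largest_rectangle_red_green : Prop := ∀ (points : List (Int × Int)), Dom_largest_rectangle_red_green points → Spec_largest_rectangle_red_green points (largest_rectangle_red_green points)

-- ===== LEMMAS AND PROOFS =====

-- abbreviations used only by the proofs
abbrev pvElem : Type := Int × (Int × Int) × (Int × Int)

abbrev pvSt : Type := Int × (Option (Int × Int)) × (Option (Int × Int))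

def pvStep (v : pvElem → Bool) (acc : pvSt) (t : pvElem) : pvSt :=
  if decide (t.1 > acc.1) && v t then (t.1, some t.2.1, some t.2.2) else acc

-- first element of maximal key (earliest wins on ties) among those satisfying v
def pvFM (v : pvElem → Bool) : List pvElem → Option pvElem
  | [] => none
  | t :: l =>
    if v t then
      match pvFM v l with
      | none => some t
      | some s => if decide (t.1 < s.1) then some s else some t
    else pvFM v l

theorem pvFM_mem (v : pvElem → Bool) (l : List pvElem) (s : pvElem)
    (h : pvFM v l = some s) : s ∈ l ∧ v s = true := by
  induction l generalizing s with
  | nil => simp [pvFM] at h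
  | cons t l ih =>
    by_cases hv : v t
    · rcases hfm : pvFM v l with _ | s'
      · simp [pvFM, hv, hfm] at h; subst h; exact ⟨List.mem_cons_self, hv⟩
      · by_cases hts : t.1 < s'.1
        · simp [pvFM, hv, hfm, hts] at h; subst h
          rcases ih _ hfm with ⟨hm, hvs⟩
          exact ⟨List.mem_cons_of_mem _ hm, hvs⟩
        · simp [pvFM, hv, hfm, hts] at h; subst h; exact ⟨List.mem_cons_self, hv⟩
    · simp only [pvFM, hv, Bool.false_eq_true, if_false] at h
      rcases ih _ h with ⟨hm, hvs⟩
      exact ⟨List.mem_cons_of_mem _ hm, hvs⟩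

theorem pvFoldStep (v : pvElem → Bool) (l : List pvElem) :
    ∀ acc : pvSt, l.foldl (pvStep v) acc =
      match pvFM v l with
      | none => acc
      | some s => if decide (s.1 > acc.1) then (s.1, some s.2.1, some s.2.2) else acc := by
  induction l with
  | nil => intro acc; simp [pvFM]
  | cons t l ih =>
    intro acc
    rw [List.foldl_cons, ih]
    by_cases hv : v t
    · rcases hfm : pvFM v l with _ | s
      · simp [pvFM, hv, hfm, pvStep]
      · by_cases hts : t.1 < s.1 <;> by_cases hta : t.1 > acc.1 <;> by_cases hsa : s.1 > acc.1 <;>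
          simp [pvFM, hv, hfm, pvStep, hts, hta, hsa] <;> omega
    · simp [pvFM, hv, pvStep]

theorem pvFM_append (v : pvElem → Bool) (l : List pvElem) (x : pvElem) :
    pvFM v (l ++ [x]) =
      match pvFM v l with
      | none => if v x then some x else none
      | some s => if v x && decide (s.1 < x.1) then some x else some s := by
  induction l with
  | nil => by_cases hv : v x <;> simp [pvFM, hv]
  | cons t l ih =>
    by_cases hv : v t
    · rcases hfm : pvFM v l with _ | s
      · by_cases hvx : v x <;> by_cases htx : t.1 < x.1 <;>
          simp [pvFM, hv, hfm, ih, hvx, htx] <;> omega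
      · by_cases hvx : v x <;> by_cases hsx : s.1 < x.1 <;> by_cases hts : t.1 < s.1 <;>
          by_cases htx : t.1 < x.1 <;>
          simp [pvFM, hv, hfm, ih, hvx, hsx, hts, htx] <;> omega
    · simp [pvFM, hv, ih]

theorem pvFind_insertBy (v : pvElem → Bool) (x : pvElem) (ys : List pvElem)
    (hs : ys.Pairwise (fun a b => b.1 ≤ a.1)) :
    (PySem.List.insertBy (fun a b => decide (b.1 < a.1)) x ys).find? v =
      match ys.find? v with
      | none => if v x then some x else none
      | some s => if v x && decide (s.1 < x.1) then some x else some s := by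
  induction ys with
  | nil =>
    by_cases hv : v x <;> simp [PySem.List.insertBy, List.find?, hv]
  | cons y ys ih =>
    have hs' : ys.Pairwise (fun a b => b.1 ≤ a.1) := hs.tail
    have hy : ∀ z ∈ ys, z.1 ≤ y.1 := fun z hz => (List.pairwise_cons.mp hs).1 z hz
    by_cases hb : y.1 < x.1
    · -- x inserted at the front
      simp only [PySem.List.insertBy, hb, decide_true, if_true]
      by_cases hvx : v x
      · rcases hf : (y :: ys).find? v with _ | s
        · simp [List.find?, hvx, hf]
        · have hsm : s ∈ y :: ys := List.mem_of_find?_eq_some hf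
          have hsy : s.1 ≤ y.1 := by
            rcases List.mem_cons.mp hsm with h | h
            · exact h ▸ le_refl _
            · exact hy s h
          have : s.1 < x.1 := lt_of_le_of_lt hsy hb
          simp [List.find?_cons, hvx, hf, this]
      · rcases hf : (y :: ys).find? v with _ | s <;>
          simp [List.find?_cons, hvx, hf]
    · -- x goes after y
      simp only [PySem.List.insertBy, hb, decide_false, Bool.false_eq_true, if_false]
      by_cases hvy : v y
      · have hnot : ¬ (v x && decide (y.1 < x.1)) = true := by simp [hb]
        simp [List.find?_cons, hvy, hnot]
      · simp only [List.find?_cons, hvy, Bool.false_eq_true, if_false]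
        exact ih hs'

theorem pvFind_sorted (v : pvElem → Bool) (l : List pvElem) :
    (PySem.List.sorted l (fun t => t.1) true).find? v = pvFM v l := by
  induction l using List.reverseRecOn with
  | nil => simp [PySem.List.sorted, pvFM]
  | append_singleton l x ih =>
    have hstep : PySem.List.sorted (l ++ [x]) (fun t : pvElem => t.1) true =
        PySem.List.insertBy (fun a b => decide (b.1 < a.1)) x
          (PySem.List.sorted l (fun t => t.1) true) := by
      rw [PySem.List.sorted_rev_eq_foldl_insertBy, PySem.List.sorted_rev_eq_foldl_insertBy,
        List.foldl_append, List.foldl_cons, List.foldl_nil]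
    rw [hstep, pvFind_insertBy v x _ (PySem.List.sorted_pairwise_rev l (fun t => t.1)),
      ih, pvFM_append]

-- the two interior-crossing tests agree on non-degenerate rectangles
theorem pvBlocked_eq (e : (Int × Int) × (Int × Int)) (p q : Int × Int)
    (hx : p.1 ≠ q.1) (hy : p.2 ≠ q.2) :
    pvBlocked e p q = edge_crosses_rectangle e (p, q) := by
  rcases e with ⟨⟨ax, ay⟩, ⟨bx, by'⟩⟩
  rcases p with ⟨px, py⟩
  rcases q with ⟨qx, qy⟩
  simp only [ne_eq] at hx hy
  simp only [pvBlocked, edge_crosses_rectangle]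
  rw [Bool.eq_iff_iff]
  by_cases h : ax = bx <;> simp [h] <;> split_ifs <;> simp_all <;> omega

-- a generic nested-loop reshaping: conditional append-fold builds a filtered map …
theorem pvFoldSkipAppend {α β : Type} (p : α → Bool) (f : α → β) (l : List α) (acc : List β) :
    l.foldl (fun acc x => if p x then acc else acc ++ [f x]) acc
      = acc ++ ((l.filter (fun x => !p x)).map f) := by
  induction l generalizing acc with
  | nil => simp
  | cons x l ih => by_cases hp : p x <;> simp [hp, ih, List.filter_cons]

-- … and the conditional step-fold is the step-fold over the same filtered map
theorem pvFoldSkipStep {α β γ : Type} (p : α → Bool) (f : α → β) (g : γ → β → γ)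
    (l : List α) (acc : γ) :
    l.foldl (fun acc x => if p x then acc else g acc (f x)) acc
      = ((l.filter (fun x => !p x)).map f).foldl g acc := by
  induction l generalizing acc with
  | nil => simp
  | cons x l ih => by_cases hp : p x <;> simp [hp, ih, List.filter_cons]

theorem pvFoldFlat {α γ : Type} (row : α → List pvElem) (g : γ → pvElem → γ)
    (l : List α) (acc : γ) :
    l.foldl (fun acc i => (row i).foldl g acc) acc = (l.flatMap row).foldl g acc := by
  induction l generalizing acc with
  | nil => simp
  | cons i l ih => simp [ih, List.foldl_append]

theorem largest_rectangle_red_green_eq (points : List (Int × Int)) :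
    largest_rectangle_red_green points = largest_rectangle_red_green_alt points := by
  classical
  set n : Int := (points.length : Int) with hn
  set edges := build_edges points with hedges
  -- the shared pair enumeration
  set row : Int → List pvElem := fun i =>
    ((PySem.List.pyRange (i + 1) n).filter
        (fun j => !((PySem.List.pyGetD points i (0, 0)).1 == (PySem.List.pyGetD points j (0, 0)).1
                    || (PySem.List.pyGetD points i (0, 0)).2 == (PySem.List.pyGetD points j (0, 0)).2))).map
      (fun j =>
        (rect_area (PySem.List.pyGetD points i (0, 0)) (PySem.List.pyGetD points j (0, 0)),
          PySem.List.pyGetD points i (0, 0),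
          PySem.List.pyGetD points j (0, 0))) with hrow
  set R : List pvElem := (PySem.List.pyRange 0 n).flatMap row with hR
  -- rectangles in R have distinct corner coordinates
  have hne : ∀ t ∈ R, t.2.1.1 ≠ t.2.2.1 ∧ t.2.1.2 ≠ t.2.2.2 := by
    intro t ht
    rw [hR] at ht
    rcases List.mem_flatMap.mp ht with ⟨i, _, hti⟩
    rw [hrow] at hti
    rcases List.mem_map.mp hti with ⟨j, hj, rfl⟩
    have hc := (List.mem_filter.mp hj).2
    simp only [Bool.not_eq_eq_eq_not, Bool.not_true, Bool.or_eq_false_iff,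
      beq_eq_false_iff_ne, ne_eq] at hc
    exact hc
  -- A's rects list is R
  have hA : largest_rectangle_red_green points =
      match (PySem.List.sorted R (fun t => t.1) true).find? (fun t : pvElem => !(edges.any (fun e => edge_crosses_rectangle e (t.2.1, t.2.2)))) with
      | some t => (t.1, some t.2.1, some t.2.2)
      | none => (0, none, none) := by
    simp only [largest_rectangle_red_green]
    rw [← hn, ← hedges]
    have : (PySem.List.pyRange 0 n).foldl
        (fun acc i =>
          (PySem.List.pyRange (i + 1) n).foldl
            (fun acc2 j =>
              if (PySem.List.pyGetD points i (0, 0)).1 == (PySem.List.pyGetD points j (0, 0)).1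
                  || (PySem.List.pyGetD points i (0, 0)).2 == (PySem.List.pyGetD points j (0, 0)).2
              then acc2
              else acc2 ++ [(rect_area (PySem.List.pyGetD points i (0, 0)) (PySem.List.pyGetD points j (0, 0)),
                PySem.List.pyGetD points i (0, 0), PySem.List.pyGetD points j (0, 0))]) acc) [] = R := by
      rw [hR]
      have step1 := PySem.List.foldl_congr_mem (PySem.List.pyRange 0 n)
        (fun acc i =>
          (PySem.List.pyRange (i + 1) n).foldl
            (fun acc2 j =>
              if (PySem.List.pyGetD points i (0, 0)).1 == (PySem.List.pyGetD points j (0, 0)).1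
                  || (PySem.List.pyGetD points i (0, 0)).2 == (PySem.List.pyGetD points j (0, 0)).2
              then acc2
              else acc2 ++ [(rect_area (PySem.List.pyGetD points i (0, 0)) (PySem.List.pyGetD points j (0, 0)),
                PySem.List.pyGetD points i (0, 0), PySem.List.pyGetD points j (0, 0))]) acc)
        (fun acc i => acc ++ row i) []
        (by
          intro acc i _
          beta_reduce
          rw [pvFoldSkipAppend
            (fun j => ((PySem.List.pyGetD points i (0, 0)).1 == (PySem.List.pyGetD points j (0, 0)).1
                      || (PySem.List.pyGetD points i (0, 0)).2 == (PySem.List.pyGetD points j (0, 0)).2))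
            (fun j =>
              (rect_area (PySem.List.pyGetD points i (0, 0)) (PySem.List.pyGetD points j (0, 0)),
                PySem.List.pyGetD points i (0, 0), PySem.List.pyGetD points j (0, 0)))])
      rw [step1, PySem.List.foldl_append_eq_flatMap]
      simp
    rw [this]
    rfl
  -- B's fold is the step-fold over R
  have hB : largest_rectangle_red_green_alt points = R.foldl (pvStep (fun t : pvElem => !(edges.any (fun e => edge_crosses_rectangle e (t.2.1, t.2.2))))) ((0 : Int), none, none) := by
    simp only [largest_rectangle_red_green_alt]
    rw [← hn]
    have hedges_alt : (PySem.List.pyRange 0 n).foldl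
        (fun acc i =>
          acc ++ [(PySem.List.pyGetD points i (0, 0),
                   PySem.List.pyGetD points (PySem.Int.mod (i + 1) n) (0, 0))]) [] = edges := by
      rw [hedges]; rfl
    rw [hedges_alt, hR, ← pvFoldFlat row (pvStep (fun t : pvElem => !(edges.any (fun e => edge_crosses_rectangle e (t.2.1, t.2.2)))))]
    refine PySem.List.foldl_congr_mem _ _ _ _ ?_
    intro acc i _
    beta_reduce
    rw [pvFoldSkipStep
      (fun j => ((PySem.List.pyGetD points i (0, 0)).1 == (PySem.List.pyGetD points j (0, 0)).1
                || (PySem.List.pyGetD points i (0, 0)).2 == (PySem.List.pyGetD points j (0, 0)).2))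
      (fun j =>
        ((|(PySem.List.pyGetD points i (0, 0)).1 - (PySem.List.pyGetD points j (0, 0)).1| + 1) *
          (|(PySem.List.pyGetD points i (0, 0)).2 - (PySem.List.pyGetD points j (0, 0)).2| + 1),
          PySem.List.pyGetD points i (0, 0), PySem.List.pyGetD points j (0, 0)))
      (fun acc2 t =>
        if decide (t.1 > acc2.1) && !(edges.any (fun e => pvBlocked e t.2.1 t.2.2)) then
          (t.1, some t.2.1, some t.2.2)
        else acc2)]
    have hrow_eq : ((PySem.List.pyRange (i + 1) n).filter
        (fun j => !((PySem.List.pyGetD points i (0, 0)).1 == (PySem.List.pyGetD points j (0, 0)).1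
                  || (PySem.List.pyGetD points i (0, 0)).2 == (PySem.List.pyGetD points j (0, 0)).2))).map
        (fun j =>
          ((|(PySem.List.pyGetD points i (0, 0)).1 - (PySem.List.pyGetD points j (0, 0)).1| + 1) *
            (|(PySem.List.pyGetD points i (0, 0)).2 - (PySem.List.pyGetD points j (0, 0)).2| + 1),
            PySem.List.pyGetD points i (0, 0), PySem.List.pyGetD points j (0, 0))) = row i := by
      rw [hrow]
      simp only [rect_area]
    rw [hrow_eq]
    refine PySem.List.foldl_congr_mem _ _ _ _ ?_
    intro acc2 t ht
    beta_reduce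
    have hnd : t.2.1.1 ≠ t.2.2.1 ∧ t.2.1.2 ≠ t.2.2.2 := by
      rw [hrow] at ht
      rcases List.mem_map.mp ht with ⟨j, hj, rfl⟩
      have hc := (List.mem_filter.mp hj).2
      simp only [Bool.not_eq_eq_eq_not, Bool.not_true, Bool.or_eq_false_iff,
        beq_eq_false_iff_ne, ne_eq] at hc
      exact hc
    have hbl : (fun e => pvBlocked e t.2.1 t.2.2) =
        (fun e => edge_crosses_rectangle e (t.2.1, t.2.2)) := by
      funext e; exact pvBlocked_eq e t.2.1 t.2.2 hnd.1 hnd.2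
    simp only [pvStep, hbl]
  -- every candidate area is positive
  have hpos : ∀ t ∈ R, 0 < t.1 := by
    intro t ht
    rw [hR] at ht
    rcases List.mem_flatMap.mp ht with ⟨i, _, hti⟩
    rw [hrow] at hti
    rcases List.mem_map.mp hti with ⟨j, _, rfl⟩
    simp only [rect_area]
    have h1 : (0 : Int) < |((PySem.List.pyGetD points i (0, 0)).1 - (PySem.List.pyGetD points j (0, 0)).1)| + 1 := by positivity
    have h2 : (0 : Int) < |((PySem.List.pyGetD points i (0, 0)).2 - (PySem.List.pyGetD points j (0, 0)).2)| + 1 := by positivity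
    exact mul_pos h1 h2
  rw [hA, hB, pvFoldStep, pvFind_sorted]
  rcases hfm : pvFM (fun t : pvElem => !(edges.any (fun e => edge_crosses_rectangle e (t.2.1, t.2.2)))) R with _ | s
  · rfl
  · have := (pvFM_mem (fun t : pvElem => !(edges.any (fun e => edge_crosses_rectangle e (t.2.1, t.2.2)))) R s hfm).1
    have hs := hpos s this
    simp [hs]

-- ===== VERDICT (by name: the statement is the Claim_ definition above) =====
theorem largest_rectangle_red_green_spec : Claim_equal_largest_rectangle_red_green := by
  intro points _
  unfold Spec_largest_rectangle_red_green
  exact largest_rectangle_red_green_eq points
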